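-- pv_equiv track=rewrite | github.com/tretoef-estrella/AEGIS-the-crystal-labyrinth.-V9-THE-LEVIATHAN-The-Unkillable-Deep- | aegis_v93_full.py | line_basis
-- ===== SOURCE A (Python) =====
-- GF4_ADD = [[0,1,2,3],[1,0,3,2],[2,3,0,1],[3,2,1,0]]
--
-- GF4_MUL = [[0,0,0,0],[0,1,2,3],[0,2,3,1],[0,3,1,2]]
--
-- def gf_add(a, b): return GF4_ADD[a][b]
--
-- def gf_mul(a, b): return GF4_MUL[a][b]
--
-- def line_basis(line):
--     pts_l = sorted(list(line))
--     for i in range(len(pts_l)):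
--         for j in range(i+1, len(pts_l)):
--             v1, v2 = list(pts_l[i]), list(pts_l[j])
--             for a in range(6):
--                 for b in range(a+1, 6):
--                     det = gf_add(gf_mul(v1[a], v2[b]), gf_mul(v1[b], v2[a]))
--                     if det != 0:
--                         return (pts_l[i], pts_l[j])
--     return None
-- ===== SOURCE B (Python) =====
-- GF4_ADD = [[0,1,2,3],[1,0,3,2],[2,3,0,1],[3,2,1,0]]
-- GF4_MUL = [[0,0,0,0],[0,1,2,3],[0,2,3,1],[0,3,1,2]]
--
-- def gf_add(a, b): return GF4_ADD[a][b]
--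
-- def gf_mul(a, b): return GF4_MUL[a][b]
--
-- def _pivot(v):
--     for k, x in enumerate(v):
--         if x != 0:
--             return k
--     return -1
--
-- def line_basis(line):
--     pts = sorted(line)
--     for i, v1 in enumerate(pts):
--         p = _pivot(v1)
--         if p < 0:
--             continue  # v1 is the zero vector: dependent with everything
--         for v2 in pts[i + 1:]:
--             # v2 is a scalar multiple of v1 iff every minor through the pivot column vanishes
--             if any(gf_add(gf_mul(v1[p], v2[k]), gf_mul(v1[k], v2[p])) != 0 for k in range(6)):
--                 return (v1, v2)
--     return None
-- ===== Notes on version B (the rewrite author's own statement) =====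
-- stated objective: alternative
-- what changed: A's inner double loop over all 15 coordinate-pair 2x2 minors per pair is replaced by a pivot-based dependence test: per left point find its first nonzero coordinate once (table-free), then check only the 6 minors through that pivot column; the scan walks elements and list tails (enumerate/slice) instead of index ranges.
import Mathlib
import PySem

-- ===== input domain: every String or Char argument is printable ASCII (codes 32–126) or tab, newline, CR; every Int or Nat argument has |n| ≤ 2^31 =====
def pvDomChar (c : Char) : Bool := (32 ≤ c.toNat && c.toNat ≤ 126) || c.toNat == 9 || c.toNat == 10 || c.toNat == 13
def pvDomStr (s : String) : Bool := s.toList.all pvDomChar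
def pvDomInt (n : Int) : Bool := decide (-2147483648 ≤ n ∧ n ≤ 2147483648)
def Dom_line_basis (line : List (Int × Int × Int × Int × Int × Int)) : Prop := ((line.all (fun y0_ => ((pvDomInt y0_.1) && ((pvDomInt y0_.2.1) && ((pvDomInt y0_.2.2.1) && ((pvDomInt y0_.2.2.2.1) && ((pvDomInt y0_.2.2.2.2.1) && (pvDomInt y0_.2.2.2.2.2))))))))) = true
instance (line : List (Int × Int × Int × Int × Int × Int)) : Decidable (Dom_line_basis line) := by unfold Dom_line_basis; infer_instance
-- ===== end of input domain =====

-- B replaces A's 15-minor inner double loop by a pivot-based dependence test (first pivot via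
-- enumerate, then only the 6 minors through the pivot column) and walks the sorted list's
-- elements and tails instead of index ranges.

-- a point, and its coordinate list (Python's list(pts_l[i]) / tuple indexing)
def pvVec (p : Int × Int × Int × Int × Int × Int) : List Int :=
  [p.1, p.2.1, p.2.2.1, p.2.2.2.1, p.2.2.2.2.1, p.2.2.2.2.2]

-- ===== PORT A =====
def GF4ADD : List (List Int) := [[0,1,2,3],[1,0,3,2],[2,3,0,1],[3,2,1,0]]
def GF4MUL : List (List Int) := [[0,0,0,0],[0,1,2,3],[0,2,3,1],[0,3,1,2]]
-- GF4_ADD[a][b] / GF4_MUL[a][b]: exact (including Python's negative-index wraparound) for the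
-- indices -4..3; Python raises IndexError outside that range (excluded by Pre_line_basis)
def gfAdd (a b : Int) : Int := PySem.List.pyGetD (PySem.List.pyGetD GF4ADD a []) b 0
def gfMul (a b : Int) : Int := PySem.List.pyGetD (PySem.List.pyGetD GF4MUL a []) b 0

-- A's two inner loops: 'for a in range(6): for b in range(a+1,6): if det != 0: return …'
-- (the returned value does not depend on a, b, so the loops return iff some det is nonzero)
def aPairTest (v1 v2 : List Int) : Bool :=
  (PySem.List.pyRange 0 6 1).any fun a =>
    (PySem.List.pyRange (a+1) 6 1).any fun b =>
      gfAdd (gfMul (PySem.List.pyGetD v1 a 0) (PySem.List.pyGetD v2 b 0))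
            (gfMul (PySem.List.pyGetD v1 b 0) (PySem.List.pyGetD v2 a 0)) != 0

-- 'for j in range(i+1, len(pts_l))' with early return of the pair
def aScanJ (pts : List (Int × Int × Int × Int × Int × Int)) (i j : Nat) :
    Option ((Int × Int × Int × Int × Int × Int) × (Int × Int × Int × Int × Int × Int)) :=
  if j < pts.length then
    let p1 := pts.getD i default
    let p2 := pts.getD j default
    if aPairTest (pvVec p1) (pvVec p2) then some (p1, p2) else aScanJ pts i (j+1)
  else none
termination_by pts.length - j

-- 'for i in range(len(pts_l))'
def aScanI (pts : List (Int × Int × Int × Int × Int × Int)) (i : Nat) :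
    Option ((Int × Int × Int × Int × Int × Int) × (Int × Int × Int × Int × Int × Int)) :=
  if i < pts.length then
    match aScanJ pts i (i+1) with
    | some r => some r
    | none => aScanI pts (i+1)
  else none
termination_by pts.length - i

-- sorted(list(line)): Python's lexicographic tuple order = lexicographic order of the coordinate lists
def line_basis (line : List (Int × Int × Int × Int × Int × Int)) : Option ((Int × Int × Int × Int × Int × Int) × (Int × Int × Int × Int × Int × Int)) :=
  aScanI (PySem.List.sorted line pvVec false) 0

-- ===== PORT B =====
-- _pivot(v): enumerate, return the index of the first nonzero entry, else -1
def bPivotAux (k : Int) : List Int → Int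
  | [] => -1
  | x :: xs => if x ≠ 0 then k else bPivotAux (k+1) xs

def bPivot (v : List Int) : Int := bPivotAux 0 v

-- 'for v2 in pts[i+1:]: if any(gf_add(gf_mul(v1[p], v2[k]), gf_mul(v1[k], v2[p])) != 0 for k in range(6)): …'
def bInner (v1 : List Int) (p : Int) :
    List (Int × Int × Int × Int × Int × Int) → Option (Int × Int × Int × Int × Int × Int)
  | [] => none
  | q :: rest =>
    if (PySem.List.pyRange 0 6 1).any (fun k =>
        gfAdd (gfMul (PySem.List.pyGetD v1 p 0) (PySem.List.pyGetD (pvVec q) k 0))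
              (gfMul (PySem.List.pyGetD v1 k 0) (PySem.List.pyGetD (pvVec q) p 0)) != 0)
    then some q else bInner v1 p rest

-- 'for i, v1 in enumerate(pts)' walking elements and tails
def bOuter : List (Int × Int × Int × Int × Int × Int) →
    Option ((Int × Int × Int × Int × Int × Int) × (Int × Int × Int × Int × Int × Int))
  | [] => none
  | q :: rest =>
    let v1 := pvVec q
    let p := bPivot v1
    if p < 0 then bOuter rest   -- zero vector: dependent with everything
    else
      match bInner v1 p rest with
      | some q2 => some (q, q2)
      | none => bOuter rest

def line_basis_alt (line : List (Int × Int × Int × Int × Int × Int)) : Option ((Int × Int × Int × Int × Int × Int) × (Int × Int × Int × Int × Int × Int)) :=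
  bOuter (PySem.List.sorted line pvVec false)

-- ===== PRECONDITION & SPEC =====
-- a coordinate A's tables index without raising and on which A's raw-nonzero pivot view and its
-- wrapped table view agree (-4 acts as 0 inside the tables but is raw-nonzero)
abbrev R7 (x : Int) : Prop :=
  x = -3 ∨ x = -2 ∨ x = -1 ∨ x = 0 ∨ x = 1 ∨ x = 2 ∨ x = 3

-- Pre_ admits every list of fewer than two points (nothing is compared: both return None) and
-- otherwise requires every coordinate in -3..3: outside -4..3 A's table indexing raises
-- IndexError (and whether it raises depends on which entries the scan touches before an early
-- return), and -4 is excluded because A's negative-index wraparound makes it act as the zero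
-- element while any raw-nonzero pivot test reads it as nonzero.
def Pre_line_basis (line : List (Int × Int × Int × Int × Int × Int)) : Prop :=
  line.length ≤ 1 ∨ ∀ p ∈ line, ∀ x ∈ pvVec p, R7 x
instance (line : List (Int × Int × Int × Int × Int × Int)) : Decidable (Pre_line_basis line) := by unfold Pre_line_basis; infer_instance

def pvWitness_line_basis : (List (Int × Int × Int × Int × Int × Int)) :=
  [(1,0,0,0,0,0), (0,1,0,0,0,0), (1,1,0,0,0,0)]

def Spec_line_basis (line : List (Int × Int × Int × Int × Int × Int)) (out : Option ((Int × Int × Int × Int × Int × Int) × (Int × Int × Int × Int × Int × Int))) : Prop := out = line_basis_alt line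
instance (line : List (Int × Int × Int × Int × Int × Int)) (out : Option ((Int × Int × Int × Int × Int × Int) × (Int × Int × Int × Int × Int × Int))) : Decidable (Spec_line_basis line out) := by
  unfold Spec_line_basis
  haveI h6 : DecidableEq (Int × Int × Int × Int × Int × Int) := inferInstance
  haveI hp : DecidableEq ((Int × Int × Int × Int × Int × Int) × (Int × Int × Int × Int × Int × Int)) :=
    fun a b => @instDecidableEqProd _ _ h6 h6 a b
  infer_instance

-- ===== CLAIM (what is proved, stated in full; the proofs are below) =====
def Claim_equal_line_basis : Prop := ∀ (line : List (Int × Int × Int × Int × Int × Int)), Dom_line_basis line → Pre_line_basis line → Spec_line_basis line (line_basis line)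

-- ===== LEMMAS AND PROOFS =====

-- GF(4) inverse table, used only by the proofs below (to name the dependence ratio)
def GF4INV : List Int := [0, 1, 3, 2]

-- table outputs lie in the GF(4) range
abbrev R4 (x : Int) : Prop := x = 0 ∨ x = 1 ∨ x = 2 ∨ x = 3

theorem coordR7 {v : List Int} (g : ∀ x ∈ v, R7 x) (i : Int) : R7 (PySem.List.pyGetD v i 0) := by
  by_cases h : PySem.Raise.InRange v.length i
  · exact g _ (PySem.List.pyGetD_mem v 0 h)
  · rw [PySem.List.pyGetD_of_none v i 0 ((PySem.List.pyGet?_eq_none_iff v i).mpr h)]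
    decide

theorem R4_mul7 {a b : Int} (ha : R7 a) (hb : R7 b) : R4 (gfMul a b) := by
  rcases ha with h|h|h|h|h|h|h <;> rcases hb with h'|h'|h'|h'|h'|h'|h' <;> subst h h' <;> decide

theorem R4_mul {a b : Int} (ha : R4 a) (hb : R4 b) : R4 (gfMul a b) := by
  rcases ha with h|h|h|h <;> rcases hb with h'|h'|h'|h' <;> subst h h' <;> decide

theorem R4_inv {a : Int} (ha : R4 a) : R4 (PySem.List.pyGetD GF4INV a 0) := by
  rcases ha with h|h|h|h <;> subst h <;> decide

-- the tables see a -3..3 coordinate through Python's wraparound, i.e. modulo 4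
theorem mul_mod {a b : Int} (ha : R7 a) (hb : R7 b) : gfMul a b = gfMul (a % 4) (b % 4) := by
  rcases ha with h|h|h|h|h|h|h <;> rcases hb with h'|h'|h'|h'|h'|h'|h' <;> subst h h' <;> decide

theorem R4_mod {a : Int} (ha : R7 a) : R4 (a % 4) := by
  rcases ha with h|h|h|h|h|h|h <;> subst h <;> decide

theorem ne_mod {a : Int} (ha : R7 a) (h : a ≠ 0) : a % 4 ≠ 0 := by
  rcases ha with h'|h'|h'|h'|h'|h'|h' <;> subst h' <;> revert h <;> decide

theorem gfMul_zero_left (y : Int) : gfMul 0 y = 0 := by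
  unfold gfMul
  rw [show PySem.List.pyGetD GF4MUL 0 [] = [0,0,0,0] from by decide]
  by_cases h : PySem.Raise.InRange ([0,0,0,0] : List Int).length y
  · simpa using PySem.List.pyGetD_mem ([0,0,0,0] : List Int) (0:Int) h
  · rw [PySem.List.pyGetD_of_none _ _ _ ((PySem.List.pyGet?_eq_none_iff _ _).mpr h)]

-- characteristic 2: a table value added to itself vanishes
theorem addself {t : Int} (ht : R4 t) : gfAdd t t = 0 := by
  rcases ht with h|h|h|h <;> subst h <;> decide

-- gfAdd is commutative on table values
theorem addcomm {s t : Int} (hs : R4 s) (ht : R4 t) : gfAdd s t = gfAdd t s := by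
  rcases hs with h|h|h|h <;> rcases ht with h'|h'|h'|h' <;> subst h h' <;> decide

-- a vanishing pivot minor determines the coordinate as a scalar multiple
theorem solve4 {xt yt xk yk : Int} (h1 : R4 xt) (h2 : R4 yt) (h3 : R4 xk) (h4 : R4 yk)
    (hne : xt ≠ 0) (h0 : gfAdd (gfMul xt yk) (gfMul xk yt) = 0) :
    yk = gfMul (gfMul (PySem.List.pyGetD GF4INV xt 0) yt) xk := by
  rcases h1 with h|h|h|h <;> rcases h2 with h'|h'|h'|h' <;> rcases h3 with h''|h''|h''|h'' <;>
    rcases h4 with h'''|h'''|h'''|h''' <;> subst h h' h'' h''' <;> revert hne h0 <;> decide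

-- if v2 is the scalar multiple c·v1 coordinatewise, every 2×2 minor vanishes
theorem Ldep {c xa xb : Int} (hc : R4 c) (ha : R4 xa) (hb : R4 xb) :
    gfAdd (gfMul xa (gfMul c xb)) (gfMul xb (gfMul c xa)) = 0 := by
  rcases hc with h|h|h|h <;> rcases ha with h'|h'|h'|h' <;> rcases hb with h''|h''|h''|h'' <;>
    subst h h' h'' <;> decide

-- both minors through a nonzero pivot vanish ⇒ the minor between the two columns vanishes
theorem dep4 {xp yp xa ya xb yb : Int}
    (hxp : R4 xp) (hyp : R4 yp) (hxa : R4 xa) (hya : R4 ya) (hxb : R4 xb) (hyb : R4 yb)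
    (hp : xp ≠ 0)
    (ha : gfAdd (gfMul xp ya) (gfMul xa yp) = 0)
    (hb : gfAdd (gfMul xp yb) (gfMul xb yp) = 0) :
    gfAdd (gfMul xa yb) (gfMul xb ya) = 0 := by
  rw [solve4 hxp hyp hxa hya hp ha, solve4 hxp hyp hxb hyb hp hb]
  exact Ldep (R4_mul (R4_inv hxp) hyp) hxa hxb

-- bPivotAux: either the list is all zero (result -1) or it reports a nonzero position
theorem bPivotAux_spec (v : List Int) : ∀ k : Int,
    (bPivotAux k v = -1 ∧ ∀ x ∈ v, x = 0) ∨
    (∃ n : Nat, bPivotAux k v = k + n ∧ ∃ h : n < v.length, v[n] ≠ 0) := by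
  induction v with
  | nil => intro k; left; exact ⟨rfl, by simp⟩
  | cons x xs ih =>
    intro k
    by_cases hx : x ≠ 0
    · right
      exact ⟨0, by simp [bPivotAux, hx], by simpa using hx⟩
    · push Not at hx
      rcases ih (k+1) with ⟨h1, h2⟩ | ⟨n, hn, hlt, hne⟩
      · left
        constructor
        · simpa [bPivotAux, hx] using h1
        · intro y hy
          rcases List.mem_cons.mp hy with h|h
          · exact h ▸ hx
          · exact h2 y h
      · right
        refine ⟨n+1, ?_, by simp only [List.length_cons]; omega, ?_⟩
        · simp only [bPivotAux, hx]
          simp only [ne_eq, not_true_eq_false, if_false] at *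
          rw [hn]; push_cast; ring
        · simpa using hne

-- indexing an all-zero list (with default 0) gives 0
theorem zeroGetD {v : List Int} (hz : ∀ x ∈ v, x = 0) (i : Int) : PySem.List.pyGetD v i 0 = 0 := by
  by_cases h : PySem.Raise.InRange v.length i
  · exact hz _ (PySem.List.pyGetD_mem v 0 h)
  · rw [PySem.List.pyGetD_of_none v i 0 ((PySem.List.pyGet?_eq_none_iff v i).mpr h)]

-- zero left vector: A's minor test is false
theorem aPairTest_zero (v1 v2 : List Int) (hz : ∀ x ∈ v1, x = 0) : aPairTest v1 v2 = false := by
  rw [Bool.eq_false_iff]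
  intro h
  simp only [aPairTest, List.any_eq_true, PySem.List.mem_pyRange_one, bne_iff_ne, ne_eq] at h
  obtain ⟨a, ⟨ha0, ha6⟩, b, ⟨hab, hb6⟩, hd⟩ := h
  rw [zeroGetD hz a, zeroGetD hz b, gfMul_zero_left, gfMul_zero_left] at hd
  exact hd (by decide)

-- with a raw-nonzero pivot p, A's 15-minor test agrees with B's 6 pivot-column minors
theorem pairTest_pos (v1 v2 : List Int)
    (g1 : ∀ x ∈ v1, R7 x) (g2 : ∀ x ∈ v2, R7 x) (p : Int) (hp0 : 0 ≤ p) (hp6 : p < 6)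
    (hne : PySem.List.pyGetD v1 p 0 ≠ 0) :
    aPairTest v1 v2 = ((PySem.List.pyRange 0 6 1).any fun k =>
      gfAdd (gfMul (PySem.List.pyGetD v1 p 0) (PySem.List.pyGetD v2 k 0))
            (gfMul (PySem.List.pyGetD v1 k 0) (PySem.List.pyGetD v2 p 0)) != 0) := by
  rw [Bool.eq_iff_iff]
  simp only [aPairTest, List.any_eq_true, PySem.List.mem_pyRange_one, bne_iff_ne, ne_eq]
  constructor
  · rintro ⟨a, ⟨ha0, ha6⟩, b, ⟨hab, hb6⟩, hdet⟩
    by_contra hB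
    push Not at hB
    apply hdet
    have ha' := hB a ⟨ha0, by omega⟩
    have hb' := hB b ⟨by omega, hb6⟩
    rw [mul_mod (coordR7 g1 p) (coordR7 g2 a), mul_mod (coordR7 g1 a) (coordR7 g2 p)] at ha'
    rw [mul_mod (coordR7 g1 p) (coordR7 g2 b), mul_mod (coordR7 g1 b) (coordR7 g2 p)] at hb'
    rw [mul_mod (coordR7 g1 a) (coordR7 g2 b), mul_mod (coordR7 g1 b) (coordR7 g2 a)]
    exact dep4 (R4_mod (coordR7 g1 p)) (R4_mod (coordR7 g2 p)) (R4_mod (coordR7 g1 a))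
      (R4_mod (coordR7 g2 a)) (R4_mod (coordR7 g1 b)) (R4_mod (coordR7 g2 b))
      (ne_mod (coordR7 g1 p) hne) ha' hb'
  · rintro ⟨k, ⟨hk0, hk6⟩, hd⟩
    rcases lt_trichotomy k p with h|h|h
    · refine ⟨k, ⟨hk0, by omega⟩, p, ⟨h, hp6⟩, ?_⟩
      rw [addcomm (R4_mul7 (coordR7 g1 k) (coordR7 g2 p)) (R4_mul7 (coordR7 g1 p) (coordR7 g2 k))]
      exact hd
    · subst h
      exact absurd (addself (R4_mul7 (coordR7 g1 k) (coordR7 g2 k))) hd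
    · exact ⟨p, ⟨hp0, by omega⟩, k, ⟨h, hk6⟩, hd⟩

-- good coordinates survive list indexing with a default
theorem goodGetD (pts : List (Int × Int × Int × Int × Int × Int))
    (h : ∀ p ∈ pts, ∀ x ∈ pvVec p, R7 x) (i : Nat) :
    ∀ x ∈ pvVec (pts.getD i default), R7 x := by
  by_cases hi : i < pts.length
  · intro x hx
    refine h (pts.getD i default) ?_ x hx
    rw [List.getD_eq_getElem pts default hi]
    exact pts.getElem_mem hi
  · rw [List.getD_eq_default pts default (by omega)]
    intro x hx
    rw [show pvVec (default : Int × Int × Int × Int × Int × Int) = [0,0,0,0,0,0] from by decide] at hx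
    have hx0 : x = 0 := by simpa using hx
    subst hx0
    decide

-- a zero left vector makes A's whole j-scan return none
theorem aScanJ_zero (pts : List (Int × Int × Int × Int × Int × Int)) (i : Nat)
    (hz : ∀ x ∈ pvVec (pts.getD i default), x = 0) (j : Nat) : aScanJ pts i j = none := by
  have key : ∀ (n j : Nat), pts.length - j ≤ n → aScanJ pts i j = none := by
    intro n
    induction n with
    | zero =>
      intro j hj
      rw [aScanJ]
      have hlt : ¬ j < pts.length := by omega
      simp [hlt]
    | succ n ih =>
      intro j hj
      rw [aScanJ]
      by_cases hlt : j < pts.length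
      · simp only [if_pos hlt]
        rw [aPairTest_zero _ _ hz]
        simpa using ih (j+1) (by omega)
      · simp [hlt]
  exact key pts.length j (by omega)

-- with a pivot for the left point, A's j-scan is B's inner element scan over the tail
theorem aScanJ_eq_bInner (pts : List (Int × Int × Int × Int × Int × Int))
    (h : ∀ q ∈ pts, ∀ x ∈ pvVec q, R7 x) (i : Nat)
    (p : Int) (hp0 : 0 ≤ p) (hp6 : p < 6)
    (hne : PySem.List.pyGetD (pvVec (pts.getD i default)) p 0 ≠ 0) (j : Nat) :
    aScanJ pts i j =
      (bInner (pvVec (pts.getD i default)) p (pts.drop j)).map (fun q => (pts.getD i default, q)) := by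
  have key : ∀ (n j : Nat), pts.length - j ≤ n → aScanJ pts i j =
      (bInner (pvVec (pts.getD i default)) p (pts.drop j)).map (fun q => (pts.getD i default, q)) := by
    intro n
    induction n with
    | zero =>
      intro j hj
      have hlt : ¬ j < pts.length := by omega
      rw [aScanJ, List.drop_eq_nil_of_le (by omega)]
      simp [hlt, bInner]
    | succ n ih =>
      intro j hj
      rw [aScanJ]
      by_cases hlt : j < pts.length
      · simp only [if_pos hlt]
        rw [List.drop_eq_getElem_cons hlt]
        have hgd : pts.getD j default = pts[j] := List.getD_eq_getElem pts default hlt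
        have htest := pairTest_pos (pvVec (pts.getD i default)) (pvVec pts[j])
          (goodGetD pts h i) (fun x hx => h pts[j] (pts.getElem_mem hlt) x hx) p hp0 hp6 hne
        simp only [bInner, hgd]
        rw [htest]
        split
        · rfl
        · simpa using ih (j+1) (by omega)
      · rw [List.drop_eq_nil_of_le (by omega)]
        simp [hlt, bInner]
  exact key pts.length j (by omega)

-- the outer scans agree: A's index loop from i is B's tail walk on drop i
theorem aScanI_eq_bOuter (pts : List (Int × Int × Int × Int × Int × Int))
    (h : ∀ q ∈ pts, ∀ x ∈ pvVec q, R7 x) (i : Nat) : aScanI pts i = bOuter (pts.drop i) := by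
  have key : ∀ (n i : Nat), pts.length - i ≤ n → aScanI pts i = bOuter (pts.drop i) := by
    intro n
    induction n with
    | zero =>
      intro i hi
      have hlt : ¬ i < pts.length := by omega
      rw [aScanI, List.drop_eq_nil_of_le (by omega)]
      simp [hlt, bOuter]
    | succ n ih =>
      intro i hi
      rw [aScanI]
      by_cases hlt : i < pts.length
      · simp only [if_pos hlt]
        rw [List.drop_eq_getElem_cons hlt]
        have hgd : pts.getD i default = pts[i] := List.getD_eq_getElem pts default hlt
        rcases bPivotAux_spec (pvVec pts[i]) 0 with ⟨heq, hz⟩ | ⟨m, heq, hm6, hmne⟩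
        · -- zero vector: both sides skip to the next element
          have hpv : bPivot (pvVec pts[i]) = -1 := heq
          rw [aScanJ_zero pts i (hgd ▸ hz) (i+1)]
          simp only [bOuter, hpv]
          rw [if_pos (by norm_num : (-1 : Int) < 0)]
          simpa using ih (i+1) (by omega)
        · -- pivot m: rewrite A's j-scan as B's inner scan and match the options
          have hpv : bPivot (pvVec pts[i]) = (m : Int) := by rw [bPivot, heq]; omega
          have hmlt : m < 6 := hm6
          have hm6' : (m : Int) < 6 := by exact_mod_cast hmlt
          have hnz : PySem.List.pyGetD (pvVec (pts.getD i default)) (m : Int) 0 ≠ 0 := by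
            rw [hgd, PySem.List.pyGetD_natCast, List.getD_eq_getElem _ _ hm6]
            exact hmne
          have hJ := aScanJ_eq_bInner pts h i (m : Int) (by positivity) hm6' hnz (i+1)
          rw [hgd] at hJ
          simp only [bOuter, hpv]
          rw [if_neg (by omega : ¬ ((m : Int) < 0))]
          rw [hJ]
          rcases hb : bInner (pvVec pts[i]) (m : Int) (pts.drop (i+1)) with _ | q2
          · simpa using ih (i+1) (by omega)
          · rfl
      · rw [List.drop_eq_nil_of_le (by omega)]
        simp [hlt, bOuter]
  exact key pts.length i (by omega)

-- fewer than two points: A's scan finds no pair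
theorem aScanI_short (pts : List (Int × Int × Int × Int × Int × Int)) (h : pts.length ≤ 1) :
    aScanI pts 0 = none := by
  match pts, h with
  | [], _ => rw [aScanI]; simp
  | [q], _ =>
    rw [aScanI]
    have h1 : aScanJ [q] 0 1 = none := by rw [aScanJ]; simp
    rw [aScanI]
    simp [h1]

-- fewer than two points: B's walk finds no pair
theorem bOuter_short (pts : List (Int × Int × Int × Int × Int × Int)) (h : pts.length ≤ 1) :
    bOuter pts = none := by
  match pts, h with
  | [], _ => rfl
  | [q], _ => simp [bOuter, bInner]

-- ===== VERDICT (by name: the statement is the Claim_ definition above) =====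
theorem line_basis_spec : Claim_equal_line_basis := by
  intro line _ hpre
  unfold Spec_line_basis line_basis line_basis_alt
  rcases hpre with hshort | hpre
  · have hlen : (PySem.List.sorted line pvVec false).length ≤ 1 := by
      rw [PySem.List.length_sorted]; exact hshort
    rw [aScanI_short _ hlen, bOuter_short _ hlen]
  · have hg : ∀ q ∈ PySem.List.sorted line pvVec false, ∀ x ∈ pvVec q, R7 x :=
      fun q hq => hpre q ((PySem.List.mem_sorted line pvVec false q).mp hq)
    simpa using aScanI_eq_bOuter _ hg 0
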